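-- pv_equiv track=rewrite | github.com/svercillo/LeetcodeAlgorithms | medium/maximum-points-inside-the-square.py | maxPointsInsideSquare
-- ===== SOURCE A (Python) =====
-- from typing import List
--
-- def maxPointsInsideSquare(points: List[List[int]], s: str) -> int:
--     tagBy = {}
--
--     for i, coords in enumerate(points):
--         tagBy[tuple(coords)] = s[i]
--
--     points.sort(key = lambda k : max(abs(k[0]), abs(k[1])))
--
--
--     broken_len = None
--     broken_ind = None
--
--     tag_set = set()
--     for i, point in enumerate(points):
--         tag = tagBy[tuple(point)]
--         if tag in tag_set:
--             broken_len = max(abs(point[0]), abs(point[1]))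
--             broken_ind = i
--             break
--         tag_set.add(tag)
--
--     if broken_len is None:
--         return len(points)
--
--     while i >= 0 and max(abs(points[i][0]), abs(points[i][1])) == broken_len:
--         i -= 1
--
--     return i + 1
-- ===== SOURCE B (Python) =====
-- def maxPointsInsideSquare(points, s):
--     # One pass: per tag keep the smallest Chebyshev distance seen so far; the
--     # conflict threshold t is the minimum over same-tag pairs of the larger of
--     # the two distances.  Then count points strictly inside that threshold.
--     best = {}          # tag -> smallest distance seen so far
--     t = None           # smallest conflicting square size
--     for p, tag in zip(points, s):
--         d = max(abs(p[0]), abs(p[1]))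
--         b = best.get(tag)
--         if b is None:
--             best[tag] = d
--         else:
--             m = d if b < d else b
--             if t is None or m < t:
--                 t = m
--             if d < b:
--                 best[tag] = d
--     if t is None:
--         return len(points)
--     return sum(1 for p in points if max(abs(p[0]), abs(p[1])) < t)
-- ===== Notes on version B (the rewrite author's own statement) =====
-- stated objective: faster
-- what changed: B replaces A's sort-by-Chebyshev-distance + scan-for-first-repeated-tag + backward walk with a single unsorted pass that keeps, per tag, the smallest distance seen so far and the running minimum over same-tag pairs of the larger distance (the conflict threshold), then counts points strictly below that threshold.
-- outside the precondition, e.g. on maxPointsInsideSquare([[1, 0], [1, 0]], 'ab'): A returns 0, B returns 2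
import Mathlib
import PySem

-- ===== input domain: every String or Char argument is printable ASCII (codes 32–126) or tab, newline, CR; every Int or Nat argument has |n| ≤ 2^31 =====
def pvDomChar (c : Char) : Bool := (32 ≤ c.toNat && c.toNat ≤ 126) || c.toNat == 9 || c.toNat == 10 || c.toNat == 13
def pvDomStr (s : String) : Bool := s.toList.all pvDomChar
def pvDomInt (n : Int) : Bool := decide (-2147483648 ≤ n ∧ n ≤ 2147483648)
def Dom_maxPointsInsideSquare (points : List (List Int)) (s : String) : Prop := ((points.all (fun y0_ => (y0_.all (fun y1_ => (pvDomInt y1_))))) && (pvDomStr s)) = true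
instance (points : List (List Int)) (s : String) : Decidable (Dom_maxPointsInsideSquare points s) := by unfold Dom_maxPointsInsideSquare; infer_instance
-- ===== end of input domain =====

-- B replaces A's sort + scan-for-first-repeated-tag + backward walk by a single O(n) pass
-- keeping, per tag, the smallest Chebyshev distance seen so far and the smallest
-- "conflict" size (min over same-tag pairs of the larger distance), then one count.
-- NOTE: Python A sorts `points` in place (an observable side effect); the equivalence
-- proved here is about the RETURN value only — B does not mutate its argument.

-- ===== PORT A =====
-- max(abs(p[0]), abs(p[1])) — the expression both Pythons use; indices 0,1 exist under Pre_
def cheb (p : List Int) : Int := max |PySem.List.pyGetD p 0 0| |PySem.List.pyGetD p 1 0|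

-- tagBy[tuple(coords)] = s[i]  (s[i] would raise IndexError when i ≥ len(s): excluded by Pre_)
def buildTag (points : List (List Int)) (s : String) : PySem.Dict (List Int) Char :=
  (PySem.List.enumerate points 0).foldl
    (fun d ic => d.insert ic.2 ((PySem.Str.pyGet? s ic.1).getD ' ')) PySem.Dict.empty

-- tagBy[tuple(point)] — KeyError is impossible: every scanned point is a dict key
def tagOf (tagBy : PySem.Dict (List Int) Char) (p : List Int) : Char :=
  (tagBy.get? p).getD ' '

-- the `for i, point in enumerate(points): ... break` scan; returns (broken_len, broken_ind)
def scanA (tagBy : PySem.Dict (List Int) Char) :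
    List (List Int) → PySem.Set Char → Nat → Option (Int × Nat)
  | [], _, _ => none
  | p :: rest, seen, i =>
      let tag := tagOf tagBy p
      if PySem.Set.contains seen tag then some (cheb p, i)
      else scanA tagBy rest (PySem.Set.add seen tag) (i + 1)

-- the `while i >= 0 and max(...) == broken_len: i -= 1` walk; returns i + 1
def backA (pts : List (List Int)) (d : Int) : Nat → Int
  | 0 => if cheb (PySem.List.pyGetD pts 0 []) = d then 0 else 1
  | i + 1 => if cheb (PySem.List.pyGetD pts ((i : Int) + 1) []) = d then backA pts d i
             else (i : Int) + 2

def maxPointsInsideSquare (points : List (List Int)) (s : String) : Int :=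
  let tagBy := buildTag points s
  let pts := PySem.List.sorted points cheb false
  match scanA tagBy pts PySem.Set.empty 0 with
  | none => (pts.length : Int)
  | some (d, i) => backA pts d i

-- ===== PORT B =====
-- one step of B's single pass over zip(points, s): state = (best-distance-per-tag dict, t)
def bStep (st : PySem.Dict Char Int × Option Int) (e : List Int × Char) :
    PySem.Dict Char Int × Option Int :=
  let d := cheb e.1
  match st.1.get? e.2 with
  | none => (st.1.insert e.2 d, st.2)
  | some b =>
      let m := if b < d then d else b
      let t := match st.2 with
               | none => some m
               | some v => if m < v then some m else some v
      (if d < b then st.1.insert e.2 d else st.1, t)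

def maxPointsInsideSquare_alt (points : List (List Int)) (s : String) : Int :=
  let st := (points.zip s.toList).foldl bStep (PySem.Dict.empty, none)
  match st.2 with
  | none => (points.length : Int)
  | some t => ((points.countP (fun p => decide (cheb p < t))) : Int)

-- ===== PRECONDITION & SPEC =====
-- Pre_ excludes inputs where Python A raises (a point with fewer than 2 coordinates:
-- IndexError in the sort key; a string shorter than points: IndexError at s[i]) and,
-- as a defensible-corner artefact, lists containing duplicate coordinate pairs carrying
-- DIFFERENT tags, on which A's dict keyed by coordinates silently reassigns tags.
def Pre_maxPointsInsideSquare (points : List (List Int)) (s : String) : Prop :=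
  points.length ≤ s.toList.length ∧
  (∀ p ∈ points, 2 ≤ p.length) ∧
  (points.zip s.toList).Pairwise (fun a b => a.1 = b.1 → a.2 = b.2)
instance (points : List (List Int)) (s : String) : Decidable (Pre_maxPointsInsideSquare points s) := by
  unfold Pre_maxPointsInsideSquare; infer_instance

def pvWitness_maxPointsInsideSquare : List (List Int) × String := ([[0, 0], [2, 1], [1, -1]], "aba")

def Spec_maxPointsInsideSquare (points : List (List Int)) (s : String) (out : Int) : Prop := out = maxPointsInsideSquare_alt points s
instance (points : List (List Int)) (s : String) (out : Int) : Decidable (Spec_maxPointsInsideSquare points s out) := by unfold Spec_maxPointsInsideSquare; infer_instance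

-- ===== CLAIM (what is proved, stated in full; the proofs are below) =====
def Claim_equal_maxPointsInsideSquare : Prop := ∀ (points : List (List Int)) (s : String), Dom_maxPointsInsideSquare points s → Pre_maxPointsInsideSquare points s → Spec_maxPointsInsideSquare points s (maxPointsInsideSquare points s)

-- ===== LEMMAS AND PROOFS =====

-- `t` is the size of some same-tag pair (the larger of the two Chebyshev distances)
def goodPair (l : List (Char × Int)) (t : Int) : Prop :=
  ∃ c a b, ([(c, a), (c, b)] : List (Char × Int)).Subperm l ∧ max a b = t

-- what both programs compute before counting: none = no same-tag pair at all;
-- some v = v is the smallest same-tag pair size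
def tcond (l : List (Char × Int)) : Option Int → Prop
  | none => ∀ t, ¬ goodPair l t
  | some v => goodPair l v ∧ ∀ u, goodPair l u → v ≤ u

lemma tcond_none_iff {l : List (Char × Int)} : tcond l none ↔ ∀ t, ¬ goodPair l t := Iff.rfl

lemma tcond_some_iff {l : List (Char × Int)} {v : Int} :
    tcond l (some v) ↔ goodPair l v ∧ ∀ u, goodPair l u → v ≤ u := Iff.rfl

-- A's scan, abstracted to a (tag, distance) list
def scanT : List (Char × Int) → PySem.Set Char → Option Int
  | [], _ => none
  | e :: rest, seen =>
      if PySem.Set.contains seen e.1 then some e.2 else scanT rest (PySem.Set.add seen e.1)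

-- B's step, abstracted to a (tag, distance) pair
def stepT (st : PySem.Dict Char Int × Option Int) (e : Char × Int) :
    PySem.Dict Char Int × Option Int :=
  match st.1.get? e.1 with
  | none => (st.1.insert e.1 e.2, st.2)
  | some b =>
      let m := if b < e.2 then e.2 else b
      let t := match st.2 with
               | none => some m
               | some v => if m < v then some m else some v
      (if e.2 < b then st.1.insert e.1 e.2 else st.1, t)

lemma pair_subperm_append {α : Type} [DecidableEq α] {u v : α} {l₁ l₂ : List α}
    (h : ([u, v] : List α).Subperm (l₁ ++ l₂)) :
    ([u, v] : List α).Subperm l₁ ∨ u ∈ l₂ ∨ v ∈ l₂ := by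
  by_cases hu : u ∈ l₂
  · exact Or.inr (Or.inl hu)
  by_cases hv : v ∈ l₂
  · exact Or.inr (Or.inr hv)
  left
  rw [List.subperm_ext_iff] at h ⊢
  intro x hx
  have hcx := h x hx
  rw [List.count_append] at hcx
  have hx2 : x = u ∨ x = v := by simpa using hx
  have h0 : l₂.count x = 0 := by
    rw [List.count_eq_zero]
    rcases hx2 with rfl | rfl
    · exact hu
    · exact hv
  omega

lemma pair_subperm_snoc {α : Type} [DecidableEq α] {u v x : α} {l : List α}
    (h : ([u, v] : List α).Subperm (l ++ [x])) :
    ([u, v] : List α).Subperm l ∨ (u = x ∧ v ∈ l) ∨ (v = x ∧ u ∈ l) ∨ (u = x ∧ v = x ∧ x ∈ l) := by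
  rw [List.subperm_ext_iff] at h
  by_cases hu : u = x
  · by_cases hv : v = x
    · refine Or.inr (Or.inr (Or.inr ⟨hu, hv, ?_⟩))
      have hc := h x (by simp [hu])
      rw [List.count_append] at hc
      have h2 : ([u, v] : List α).count x = 2 := by simp [hu, hv]
      have h1 : ([x] : List α).count x = 1 := by simp
      exact List.count_pos_iff.1 (by omega)
    · refine Or.inr (Or.inl ⟨hu, ?_⟩)
      have hc := h v (by simp)
      rw [List.count_append] at hc
      have h1 : ([x] : List α).count v = 0 := by
        rw [List.count_eq_zero]; simpa using hv
      have h2 : 0 < ([u, v] : List α).count v := List.count_pos_iff.2 (by simp)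
      exact List.count_pos_iff.1 (by omega)
  · by_cases hv : v = x
    · refine Or.inr (Or.inr (Or.inl ⟨hv, ?_⟩))
      have hc := h u (by simp)
      rw [List.count_append] at hc
      have h1 : ([x] : List α).count u = 0 := by
        rw [List.count_eq_zero]; simpa using hu
      have h2 : 0 < ([u, v] : List α).count u := List.count_pos_iff.2 (by simp)
      exact List.count_pos_iff.1 (by omega)
    · left
      rw [List.subperm_ext_iff]
      intro y hy
      have hc := h y hy
      rw [List.count_append] at hc
      have h0 : ([x] : List α).count y = 0 := by
        rw [List.count_eq_zero]
        have : y = u ∨ y = v := by simpa using hy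
        rcases this with rfl | rfl
        · simpa using hu
        · simpa using hv
      omega

lemma pair_subperm_mk {c : Char} {a b : Int} {l r : List (Char × Int)}
    (ha : (c, a) ∈ l) (hb : (c, b) ∈ r) :
    ([(c, a), (c, b)] : List (Char × Int)).Subperm (l ++ r) := by
  have : ([(c, a)] ++ [(c, b)] : List (Char × Int)).Sublist (l ++ r) :=
    List.Sublist.append (List.singleton_sublist.2 ha) (List.singleton_sublist.2 hb)
  exact this.subperm

lemma goodPair_perm {l l' : List (Char × Int)} {t : Int} (hp : l.Perm l')
    (h : goodPair l t) : goodPair l' t := by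
  obtain ⟨c, a, b, hsp, hm⟩ := h
  exact ⟨c, a, b, hsp.trans hp.subperm, hm⟩

lemma tcond_perm {l l' : List (Char × Int)} {o : Option Int} (hp : l.Perm l')
    (h : tcond l o) : tcond l' o := by
  cases o with
  | none => exact fun t ht => h t (goodPair_perm hp.symm ht)
  | some v => exact ⟨goodPair_perm hp h.1, fun u hu => h.2 u (goodPair_perm hp.symm hu)⟩

lemma tcond_unique {l : List (Char × Int)} {o₁ o₂ : Option Int}
    (h₁ : tcond l o₁) (h₂ : tcond l o₂) : o₁ = o₂ := by
  cases o₁ with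
  | none => cases o₂ with
    | none => rfl
    | some v => exact absurd h₂.1 (h₁ v)
  | some v => cases o₂ with
    | none => exact absurd h₁.1 (h₂ v)
    | some w => exact congrArg some (le_antisymm (h₁.2 w h₂.1) (h₂.2 v h₁.1))

lemma tcond_congr {l l' : List (Char × Int)} {o : Option Int}
    (hiff : ∀ u, goodPair l u ↔ goodPair l' u) (h : tcond l o) : tcond l' o := by
  cases o with
  | none => exact fun t ht => h t ((hiff t).2 ht)
  | some v => exact ⟨(hiff v).1 h.1, fun u hu => h.2 u ((hiff u).2 hu)⟩

lemma no_goodPair_of_nodup {l : List (Char × Int)} (h : (l.map Prod.fst).Nodup) (t : Int) :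
    ¬ goodPair l t := by
  rintro ⟨c, a, b, hsp, -⟩
  obtain ⟨w, hw, hsub⟩ := hsp
  have h1 : (w.map Prod.fst).Sublist (l.map Prod.fst) := hsub.map _
  have h2 : (w.map Prod.fst).Perm [c, c] := by simpa using hw.map Prod.fst
  have h3 : ([c, c] : List Char).Nodup := h2.nodup_iff.1 (h1.nodup h)
  simp at h3

lemma goodPair_snoc_iff {l : List (Char × Int)} {c : Char} {d t : Int} :
    goodPair (l ++ [(c, d)]) t ↔ goodPair l t ∨ ∃ a, (c, a) ∈ l ∧ max a d = t := by
  constructor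
  · rintro ⟨c', x, y, hsp, rfl⟩
    rcases pair_subperm_snoc hsp with h | ⟨h1, h2⟩ | ⟨h1, h2⟩ | ⟨h1, h2, h3⟩
    · exact Or.inl ⟨c', x, y, h, rfl⟩
    · have hc1 : c' = c := congrArg Prod.fst h1
      have hx1 : x = d := congrArg Prod.snd h1
      refine Or.inr ⟨y, ?_, ?_⟩
      · rw [← hc1]; exact h2
      · rw [← hx1]; exact max_comm y x
    · have hc1 : c' = c := congrArg Prod.fst h1
      have hy1 : y = d := congrArg Prod.snd h1
      refine Or.inr ⟨x, ?_, ?_⟩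
      · rw [← hc1]; exact h2
      · rw [← hy1]
    · have hx1 : x = d := congrArg Prod.snd h1
      have hy1 : y = d := congrArg Prod.snd h2
      refine Or.inr ⟨d, h3, ?_⟩
      rw [hx1, hy1]
  · rintro (⟨c', x, y, hsp, hm⟩ | ⟨a, hmem, hm⟩)
    · exact ⟨c', x, y, hsp.trans (List.sublist_append_left _ _).subperm, hm⟩
    · exact ⟨c, a, d, pair_subperm_mk hmem (by simp), hm⟩

lemma min?_snoc (xs : List Int) (d : Int) :
    (xs ++ [d]).min? = some (xs.min?.elim d (fun b => min b d)) := by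
  cases xs with
  | nil => simp [List.min?]
  | cons x t => simp [List.min?, List.foldl_append]

-- ===== A-side =====

lemma scanA_some {tagBy : PySem.Dict (List Int) Char} :
    ∀ (l : List (List Int)) (seen : PySem.Set Char) (i : Nat) (d : Int) (j : Nat),
      scanA tagBy l seen i = some (d, j) →
      ∃ k, ∃ hk : k < l.length, j = i + k ∧ cheb l[k] = d := by
  intro l
  induction l with
  | nil => intro seen i d j h; simp [scanA] at h
  | cons p rest ih =>
    intro seen i d j h
    rw [scanA] at h
    by_cases hc : PySem.Set.contains seen (tagOf tagBy p) = true
    · simp only [hc, if_true] at h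
      obtain ⟨rfl, rfl⟩ : cheb p = d ∧ i = j := by
        constructor
        · exact congrArg Prod.fst (Option.some.inj h)
        · exact congrArg Prod.snd (Option.some.inj h)
      exact ⟨0, by simp, by omega, by simp⟩
    · simp only [hc] at h
      obtain ⟨k, hk, rfl, hcheb⟩ := ih _ _ _ _ h
      exact ⟨k + 1, by simpa using Nat.succ_lt_succ hk, by omega, by simpa using hcheb⟩

lemma scanT_map {tagBy : PySem.Dict (List Int) Char} :
    ∀ (l : List (List Int)) (seen : PySem.Set Char) (i : Nat),
      scanT (l.map (fun p => (tagOf tagBy p, cheb p))) seen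
        = (scanA tagBy l seen i).map Prod.fst := by
  intro l
  induction l with
  | nil => intro seen i; simp [scanT, scanA]
  | cons p rest ih =>
    intro seen i
    rw [List.map_cons, scanT, scanA]
    by_cases hm : tagOf tagBy p ∈ seen
    · simp [PySem.Set.contains, hm]
    · have hc : PySem.Set.contains seen (tagOf tagBy p) = false := by
        simp [PySem.Set.contains, hm]
      simp only [hc, Bool.false_eq_true, if_false]
      exact ih _ _

lemma keyA : ∀ (m pre : List (Char × Int)) (seen : PySem.Set Char),
    m.Pairwise (fun a b => a.2 ≤ b.2) →
    (pre.map Prod.fst).Nodup →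
    (∀ e ∈ pre, ∀ e' ∈ m, e.2 ≤ e'.2) →
    (∀ c, PySem.Set.contains seen c = true ↔ c ∈ pre.map Prod.fst) →
    tcond (pre ++ m) (scanT m seen) := by
  intro m
  induction m with
  | nil =>
    intro pre seen _ hnd _ _
    rw [List.append_nil]
    exact fun t => no_goodPair_of_nodup hnd t
  | cons e rest ih =>
    obtain ⟨c, d⟩ := e
    intro pre seen hp hnd hle hseen
    rw [scanT]
    by_cases hc : PySem.Set.contains seen c = true
    · rw [if_pos hc]
      have hcpre : c ∈ pre.map Prod.fst := (hseen c).1 hc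
      obtain ⟨e₀, he₀, hfst⟩ := List.mem_map.1 hcpre
      obtain ⟨c₀, a⟩ := e₀
      obtain rfl : c = c₀ := hfst.symm
      constructor
      · refine ⟨c, a, d, pair_subperm_mk he₀ List.mem_cons_self, ?_⟩
        exact max_eq_right (hle _ he₀ _ List.mem_cons_self)
      · rintro u ⟨c', x, y, hsp, rfl⟩
        have hrest : ∀ e' ∈ (c, d) :: rest, d ≤ e'.2 := by
          intro e' he'
          rcases List.mem_cons.1 he' with rfl | he'
          · exact le_refl d
          · exact (List.pairwise_cons.1 hp).1 _ he'
        rcases pair_subperm_append hsp with h | hx | hy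
        · exact absurd ⟨c', x, y, h, rfl⟩ (no_goodPair_of_nodup hnd _)
        · exact le_trans (show d ≤ x from hrest _ hx) (le_max_left x y)
        · exact le_trans (show d ≤ y from hrest _ hy) (le_max_right x y)
    · rw [if_neg hc]
      have hcnot : c ∉ pre.map Prod.fst := fun h => hc ((hseen c).2 h)
      have hrec := ih (pre ++ [(c, d)]) (PySem.Set.add seen c)
        (List.pairwise_cons.1 hp).2 ?_ ?_ ?_
      · rw [List.append_assoc] at hrec
        simpa using hrec
      · have hnd2 : (pre.map Prod.fst ++ [c]).Nodup := by
          refine List.Nodup.append hnd (by simp) ?_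
          intro a ha hb
          have hac : a = c := by simpa using hb
          exact hcnot (hac ▸ ha)
        simpa using hnd2
      · intro e he e' he'
        rcases List.mem_append.1 he with he | he
        · exact hle _ he _ (List.mem_cons_of_mem _ he')
        · obtain rfl : e = (c, d) := by simpa using he
          exact (List.pairwise_cons.1 hp).1 _ he'
      · intro c'
        constructor
        · intro h
          have : c' ∈ PySem.Set.add seen c := by simpa [PySem.Set.contains] using h
          rcases (PySem.Set.mem_add seen c c').1 this with h' | rfl
          · have := (hseen c').1 (by simpa [PySem.Set.contains] using h')
            simp [this]
          · simp
        · intro h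
          have h' : c' ∈ pre.map Prod.fst ∨ c' = c := by
            simpa using h
          have : c' ∈ PySem.Set.add seen c := by
            refine (PySem.Set.mem_add seen c c').2 ?_
            rcases h' with h' | rfl
            · exact Or.inl (by simpa [PySem.Set.contains] using (hseen c').2 h')
            · exact Or.inr rfl
          simpa [PySem.Set.contains] using this

lemma countP_eq_of_prefix {α : Type} (l : List α) (p : α → Bool) (k : Nat) (hk : k ≤ l.length)
    (h1 : ∀ j (hj : j < l.length), j < k → p l[j] = true)
    (h2 : ∀ j (hj : j < l.length), k ≤ j → p l[j] = false) :
    l.countP p = k := by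
  conv_lhs => rw [← List.take_append_drop k l]
  rw [List.countP_append]
  have ht : (l.take k).countP p = (l.take k).length := by
    rw [List.countP_eq_length]
    intro a ha
    obtain ⟨i, hi, rfl⟩ := List.mem_iff_getElem.1 ha
    rw [List.getElem_take]
    have hi' : i < k := by simp at hi; omega
    exact h1 i (by simp at hi; omega) hi'
  have hd : (l.drop k).countP p = 0 := by
    rw [List.countP_eq_zero]
    intro a ha
    obtain ⟨i, hi, rfl⟩ := List.mem_iff_getElem.1 ha
    rw [List.getElem_drop]
    have := h2 (k + i) (by simp at hi; omega) (by omega)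
    simp [this]
  rw [ht, hd, List.length_take]
  omega

lemma backA_eq (pts : List (List Int)) (d : Int)
    (hp : pts.Pairwise (fun a b => cheb a ≤ cheb b)) :
    ∀ (i : Nat) (hi : i < pts.length), cheb pts[i] ≤ d →
      (∀ j (hj : j < pts.length), i < j → d ≤ cheb pts[j]) →
      backA pts d i = (pts.countP (fun p => decide (cheb p < d)) : Int) := by
  have hmono : ∀ (a b : Nat) (ha : a < pts.length) (hb : b < pts.length), a ≤ b →
      cheb pts[a] ≤ cheb pts[b] := by
    intro a b ha hb hab
    rcases Nat.eq_or_lt_of_le hab with rfl | h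
    · exact le_refl _
    · exact List.pairwise_iff_getElem.1 hp a b ha hb h
  intro i
  induction i with
  | zero =>
    intro hi hle hgt
    rw [backA]
    have h0 : PySem.List.pyGetD pts 0 [] = pts[0] := by
      have := PySem.List.pyGetD_eq_getElem pts ([] : List Int) (i := (0 : Int))
        (by omega) (by exact_mod_cast hi)
      simpa using this
    rw [h0]
    by_cases he : cheb pts[0] = d
    · rw [if_pos he]
      have : pts.countP (fun p => decide (cheb p < d)) = 0 := by
        refine countP_eq_of_prefix pts _ 0 (by omega) (by omega) ?_
        intro j hj _
        rcases Nat.eq_zero_or_pos j with rfl | hpos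
        · simp [he]
        · simp [not_lt.2 (hgt j hj hpos)]
      simp [this]
    · rw [if_neg he]
      have hlt : cheb pts[0] < d := lt_of_le_of_ne hle he
      have : pts.countP (fun p => decide (cheb p < d)) = 1 := by
        refine countP_eq_of_prefix pts _ 1 (by omega) ?_ ?_
        · intro j hj hj1
          have : j = 0 := by omega
          subst this
          simp [hlt]
        · intro j hj hj1
          simp [not_lt.2 (hgt j hj (by omega))]
      simp [this]
  | succ i ihh =>
    intro hi hle hgt
    rw [backA]
    have h0 : PySem.List.pyGetD pts ((i : Int) + 1) [] = pts[i + 1] := by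
      have h1 := PySem.List.pyGetD_eq_getElem pts ([] : List Int) (i := ((i : Int) + 1))
        (by omega) (by exact_mod_cast hi)
      have h2 : ((i : Int) + 1).toNat = i + 1 := by omega
      simpa [h2] using h1
    rw [h0]
    by_cases he : cheb pts[i + 1] = d
    · rw [if_pos he]
      refine ihh (by omega) ?_ ?_
      · calc cheb pts[i] ≤ cheb pts[i + 1] := hmono i (i + 1) (by omega) hi (by omega)
          _ ≤ d := le_of_eq he
      · intro j hj hij
        by_cases hji : j = i + 1
        · subst hji; exact le_of_eq he.symm
        · exact hgt j hj (by omega)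
    · rw [if_neg he]
      have hlt : cheb pts[i + 1] < d := lt_of_le_of_ne hle he
      have : pts.countP (fun p => decide (cheb p < d)) = i + 2 := by
        refine countP_eq_of_prefix pts _ (i + 2) (by omega) ?_ ?_
        · intro j hj hj2
          have : cheb pts[j] ≤ cheb pts[i + 1] := hmono j (i + 1) hj hi (by omega)
          simp [lt_of_le_of_lt this hlt]
        · intro j hj hj2
          simp [not_lt.2 (hgt j hj (by omega))]
      rw [this]
      push_cast
      ring

-- ===== B-side =====

lemma keyB : ∀ (l pre : List (Char × Int)) (dct : PySem.Dict Char Int) (t : Option Int),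
    (∀ c, dct.get? c = ((pre.filter (fun e => e.1 == c)).map Prod.snd).min?) →
    tcond pre t →
    tcond (pre ++ l) (l.foldl stepT (dct, t)).2 := by
  intro l
  induction l with
  | nil =>
    intro pre dct t _ ht
    simpa using ht
  | cons e rest ih =>
    obtain ⟨c, d⟩ := e
    intro pre dct t hdict ht
    rw [List.foldl_cons]
    have hkey := hdict c
    cases hget : dct.get? c with
    | none =>
      rw [hget] at hkey
      have hfil : pre.filter (fun e => e.1 == c) = [] :=
        List.map_eq_nil_iff.1 (List.min?_eq_none_iff.1 hkey.symm)
      have hstep : stepT (dct, t) (c, d) = (dct.insert c d, t) := by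
        simp [stepT, hget]
      rw [hstep]
      have hrec := ih (pre ++ [(c, d)]) (dct.insert c d) t ?_ ?_
      · rw [List.append_assoc] at hrec
        simpa using hrec
      · intro c'
        rw [PySem.Dict.get?_insert, List.filter_append]
        by_cases hc' : c' = c
        · subst hc'
          rw [if_pos rfl, hfil]
          simp [List.min?]
        · rw [if_neg hc']
          have hfil0 : ([(c, d)] : List (Char × Int)).filter (fun e => e.1 == c') = [] := by
            simp only [List.filter_cons, List.filter_nil]
            have hne : ((c, d).1 == c') = false := by
              simp only [beq_eq_false_iff_ne, ne_eq]
              exact fun h => hc' h.symm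
            simp [hne]
          rw [hfil0, List.append_nil]
          exact hdict c'
      · refine tcond_congr (fun u => ?_) ht
        rw [goodPair_snoc_iff]
        constructor
        · exact Or.inl
        · rintro (h | ⟨a, ha, -⟩)
          · exact h
          · exfalso
            have hmem : (c, a) ∈ pre.filter (fun e => e.1 == c) :=
              List.mem_filter.2 ⟨ha, by simp⟩
            rw [hfil] at hmem
            simp at hmem
    | some b =>
      rw [hget] at hkey
      obtain ⟨hbmem, hbmin⟩ := List.min?_eq_some_iff.1 hkey.symm
      obtain ⟨eb, hebf, hebs⟩ := List.mem_map.1 hbmem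
      obtain ⟨hebp, hebc⟩ := List.mem_filter.1 hebf
      have hcb : (c, b) ∈ pre := by
        obtain ⟨c₁, b₁⟩ := eb
        have h1 : c₁ = c := by simpa using hebc
        have h2 : b₁ = b := hebs
        rw [← h1, ← h2]
        exact hebp
      have hball : ∀ a, (c, a) ∈ pre → b ≤ a := by
        intro a ha
        exact hbmin a (List.mem_map.2 ⟨(c, a), List.mem_filter.2 ⟨ha, by simp⟩, rfl⟩)
      have hmax : (if b < d then d else b) = max b d := by
        rcases lt_or_ge b d with h | h
        · rw [if_pos h, max_eq_right (le_of_lt h)]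
        · rw [if_neg (not_lt.2 h), max_eq_left h]
      have hdict' : ∀ c', (if d < b then dct.insert c d else dct).get? c' =
          (((pre ++ [(c, d)]).filter (fun e => e.1 == c')).map Prod.snd).min? := by
        intro c'
        rw [List.filter_append]
        by_cases hc' : c' = c
        · subst hc'
          have hfil1 : ([(c', d)] : List (Char × Int)).filter (fun e => e.1 == c') = [(c', d)] := by
            simp
          rw [hfil1, List.map_append]
          simp only [List.map_cons, List.map_nil]
          rw [min?_snoc, ← hkey]
          by_cases hd : d < b
          · rw [if_pos hd, PySem.Dict.get?_insert_self]
            simp [min_eq_right (le_of_lt hd)]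
          · rw [if_neg hd, hget]
            simp [min_eq_left (not_lt.1 hd)]
        · have hfil0 : ([(c, d)] : List (Char × Int)).filter (fun e => e.1 == c') = [] := by
            simp only [List.filter_cons, List.filter_nil]
            have hne : ((c, d).1 == c') = false := by
              simp only [beq_eq_false_iff_ne, ne_eq]
              exact fun h => hc' h.symm
            simp [hne]
          rw [hfil0, List.append_nil]
          by_cases hd : d < b
          · rw [if_pos hd, PySem.Dict.get?_insert, if_neg hc']
            exact hdict c'
          · rw [if_neg hd]
            exact hdict c'
      have hnew_lb : ∀ a, (c, a) ∈ pre → max b d ≤ max a d :=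
        fun a ha => max_le_max (hball a ha) (le_refl d)
      have hnew_mem : goodPair (pre ++ [(c, d)]) (max b d) :=
        goodPair_snoc_iff.2 (Or.inr ⟨b, hcb, rfl⟩)
      cases t with
      | none =>
        have hstep : stepT (dct, none) (c, d) =
            ((if d < b then dct.insert c d else dct), some (max b d)) := by
          simp [stepT, hget, hmax]
        rw [hstep]
        have ht' : tcond (pre ++ [(c, d)]) (some (max b d)) := by
          rw [tcond_some_iff]
          refine ⟨hnew_mem, ?_⟩
          intro u hu
          rcases goodPair_snoc_iff.1 hu with h | ⟨a, ha, rfl⟩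
          · exact absurd h (tcond_none_iff.1 ht _)
          · exact hnew_lb a ha
        have hrec := ih (pre ++ [(c, d)]) _ _ hdict' ht'
        rw [List.append_assoc] at hrec
        simpa using hrec
      | some v =>
        obtain ⟨hv1, hv2⟩ := tcond_some_iff.1 ht
        by_cases hmv : max b d < v
        · have hstep : stepT (dct, some v) (c, d) =
              ((if d < b then dct.insert c d else dct), some (max b d)) := by
            simp [stepT, hget, hmax, hmv]
          rw [hstep]
          have ht' : tcond (pre ++ [(c, d)]) (some (max b d)) := by
            rw [tcond_some_iff]
            refine ⟨hnew_mem, ?_⟩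
            intro u hu
            rcases goodPair_snoc_iff.1 hu with h | ⟨a, ha, rfl⟩
            · exact le_trans (le_of_lt hmv) (hv2 u h)
            · exact hnew_lb a ha
          have hrec := ih (pre ++ [(c, d)]) _ _ hdict' ht'
          rw [List.append_assoc] at hrec
          simpa using hrec
        · have hstep : stepT (dct, some v) (c, d) =
              ((if d < b then dct.insert c d else dct), some v) := by
            simp [stepT, hget, hmax, hmv]
          rw [hstep]
          have ht' : tcond (pre ++ [(c, d)]) (some v) := by
            rw [tcond_some_iff]
            refine ⟨goodPair_snoc_iff.2 (Or.inl hv1), ?_⟩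
            intro u hu
            rcases goodPair_snoc_iff.1 hu with h | ⟨a, ha, rfl⟩
            · exact hv2 u h
            · exact le_trans (not_lt.1 hmv) (hnew_lb a ha)
          have hrec := ih (pre ++ [(c, d)]) _ _ hdict' ht'
          rw [List.append_assoc] at hrec
          simpa using hrec

-- ===== dict of tags =====

lemma get_foldl_insert_keep :
    ∀ (zl : List (List Int × Char)) (d : PySem.Dict (List Int) Char) (p : List Int) (c : Char),
      d.get? p = some c → (∀ e ∈ zl, e.1 = p → e.2 = c) →
      (zl.foldl (fun d e => d.insert e.1 e.2) d).get? p = some c := by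
  intro zl
  induction zl with
  | nil => intro d p c h _; simpa using h
  | cons f rest ih =>
    intro d p c h hcons
    rw [List.foldl_cons]
    refine ih _ _ _ ?_ ?_
    · rw [PySem.Dict.get?_insert]
      by_cases hf : p = f.1
      · rw [if_pos hf]
        rw [hcons f List.mem_cons_self hf.symm]
      · rw [if_neg hf]
        exact h
    · exact fun e he h1 => hcons e (List.mem_cons_of_mem _ he) h1

lemma get_foldl_insert :
    ∀ (zl : List (List Int × Char)) (d : PySem.Dict (List Int) Char),
      zl.Pairwise (fun a b => a.1 = b.1 → a.2 = b.2) →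
      ∀ p c, (p, c) ∈ zl →
      (zl.foldl (fun d e => d.insert e.1 e.2) d).get? p = some c := by
  intro zl
  induction zl with
  | nil => intro d _ p c h; simp at h
  | cons f rest ih =>
    intro d hpw p c hmem
    rw [List.foldl_cons]
    rcases List.mem_cons.1 hmem with rfl | hmem
    · refine get_foldl_insert_keep rest _ _ _ ?_ ?_
      · exact PySem.Dict.get?_insert_self _ _ _
      · intro e he h1
        exact ((List.pairwise_cons.1 hpw).1 e he h1.symm).symm
    · exact ih _ (List.pairwise_cons.1 hpw).2 p c hmem

lemma buildTag_eq (points : List (List Int)) (s : String)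
    (hlen : points.length ≤ s.toList.length) :
    buildTag points s
      = (points.zip s.toList).foldl (fun d e => d.insert e.1 e.2) PySem.Dict.empty := by
  unfold buildTag
  have hmap : (PySem.List.enumerate points 0).map
      (fun ic => (ic.2, (PySem.Str.pyGet? s ic.1).getD ' ')) = points.zip s.toList := by
    have hlen' : points.length ≤ s.length := by simpa using hlen
    apply List.ext_getElem
    · simp [PySem.List.length_enumerate, List.length_zip]
      omega
    · intro k h1 h2
      have hk : k < points.length := by
        simpa [PySem.List.length_enumerate] using h1
      rw [List.getElem_map, PySem.List.getElem_enumerate, List.getElem_zip]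
      have hsl : k < s.toList.length := lt_of_lt_of_le hk hlen
      simp [List.getElem?_eq_getElem hsl]
  rw [← hmap, List.foldl_map]

lemma buildTag_get (points : List (List Int)) (s : String)
    (hlen : points.length ≤ s.toList.length)
    (hcons : (points.zip s.toList).Pairwise (fun a b => a.1 = b.1 → a.2 = b.2)) :
    ∀ k (hk : k < points.length),
      (buildTag points s).get? points[k] = some (s.toList[k]'(lt_of_lt_of_le hk hlen)) := by
  intro k hk
  rw [buildTag_eq points s hlen]
  apply get_foldl_insert _ _ hcons
  have hzk : k < (points.zip s.toList).length := by
    rw [List.length_zip]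
    omega
  have hmem : (points.zip s.toList)[k] ∈ points.zip s.toList := List.getElem_mem hzk
  rw [List.getElem_zip] at hmem
  exact hmem

-- ===== VERDICT (by name: the statement is the Claim_ definition above) =====
theorem maxPointsInsideSquare_spec : Claim_equal_maxPointsInsideSquare := by
  intro points s _ hpre
  obtain ⟨hlen, _hpts2, hcons⟩ := hpre
  unfold Spec_maxPointsInsideSquare
  show maxPointsInsideSquare points s = maxPointsInsideSquare_alt points s
  simp only [maxPointsInsideSquare, maxPointsInsideSquare_alt]
  set tagBy := buildTag points s with htagdef
  set pts := PySem.List.sorted points cheb false with hptsdef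
  have hperm : pts.Perm points := PySem.List.sorted_perm _ _ _
  have htag : ∀ k (hk : k < points.length),
      tagBy.get? points[k] = some (s.toList[k]'(lt_of_lt_of_le hk hlen)) :=
    buildTag_get points s hlen hcons
  have hmapeq : points.map (fun p => (tagOf tagBy p, cheb p))
      = (points.zip s.toList).map (fun e => (e.2, cheb e.1)) := by
    have hlen' : points.length ≤ s.length := by simpa using hlen
    apply List.ext_getElem
    · simp [List.length_zip]
      omega
    · intro k h1 h2
      have hk : k < points.length := by simpa using h1
      simp only [List.getElem_map, List.getElem_zip]
      unfold tagOf
      rw [htag k hk]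
      rfl
  have hsortp : pts.Pairwise (fun a b => cheb a ≤ cheb b) := PySem.List.sorted_pairwise points cheb
  have hpairT : (pts.map (fun p => (tagOf tagBy p, cheb p))).Pairwise
      (fun a b => a.2 ≤ b.2) := List.pairwise_map.2 (by simpa using hsortp)
  have hA0 : tcond (pts.map (fun p => (tagOf tagBy p, cheb p)))
      (scanT (pts.map (fun p => (tagOf tagBy p, cheb p))) PySem.Set.empty) := by
    have h := keyA (pts.map (fun p => (tagOf tagBy p, cheb p))) [] PySem.Set.empty hpairT
      (by simp) (by simp) ?_
    · simpa using h
    · intro c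
      constructor
      · intro h
        simp [PySem.Set.contains, PySem.Set.empty] at h
      · intro h
        simp at h
  rw [scanT_map pts PySem.Set.empty 0] at hA0
  have hBfold : (points.zip s.toList).foldl bStep (PySem.Dict.empty, none)
      = ((points.zip s.toList).map (fun e => (e.2, cheb e.1))).foldl stepT
          (PySem.Dict.empty, none) := by
    rw [List.foldl_map]
    rfl
  have hB0 : tcond ((points.zip s.toList).map (fun e => (e.2, cheb e.1)))
      ((((points.zip s.toList).map (fun e => (e.2, cheb e.1))).foldl stepT
        (PySem.Dict.empty, none)).2) := by
    have h := keyB ((points.zip s.toList).map (fun e => (e.2, cheb e.1))) []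
      PySem.Dict.empty none ?_ ?_
    · simpa using h
    · intro c
      simp [PySem.Dict.get?_empty, List.min?]
    · intro t
      rintro ⟨c, a, b, hsp, -⟩
      have := hsp.length_le
      simp at this
  have hpermT : (pts.map (fun p => (tagOf tagBy p, cheb p))).Perm
      ((points.zip s.toList).map (fun e => (e.2, cheb e.1))) := by
    rw [← hmapeq]
    exact hperm.map _
  have hAB := tcond_unique (tcond_perm hpermT hA0) hB0
  cases hscan : scanA tagBy pts PySem.Set.empty 0 with
  | none =>
    rw [hscan] at hAB
    simp only [Option.map_none] at hAB
    rw [hBfold, ← hAB]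
    simp [hptsdef, PySem.List.length_sorted]
  | some di =>
    obtain ⟨d, i⟩ := di
    rw [hscan] at hAB
    simp only [Option.map_some] at hAB
    obtain ⟨k, hk, hik, hcheb⟩ := scanA_some pts PySem.Set.empty 0 d i hscan
    rw [hBfold, ← hAB]
    show backA pts d i = ((points.countP (fun p => decide (cheb p < d)) : Nat) : Int)
    have hkin : i < pts.length := by omega
    have hikk : pts[i]'hkin = pts[k]'hk := by
      congr 1
      omega
    rw [backA_eq pts d hsortp i hkin ?_ ?_]
    · exact_mod_cast congrArg Nat.cast (hperm.countP_eq _)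
    · rw [hikk, hcheb]
    · intro j hj hij
      have hmono : cheb (pts[k]'hk) ≤ cheb (pts[j]'hj) := by
        rcases Nat.lt_or_ge k j with h | h
        · exact List.pairwise_iff_getElem.1 hsortp k j hk hj h
        · have : k = j ∨ j < k := by omega
          rcases this with rfl | h2
          · exact le_refl _
          · exact absurd h2 (by omega)
      rw [← hcheb]
      exact hmono
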